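-- pv_equiv track=rewrite | github.com/digitalgoldfisj79/Voynichdecomp | v3d_p70_test.py | decompose_latin
-- ===== SOURCE A (Python) =====
-- LAT_INITIALS = [
--     'str', 'spr', 'scr', 'squ',
--     'sp', 'st', 'sc', 'sq', 'sl', 'sm', 'sn',
--     'pr', 'pl', 'tr', 'th', 'cr', 'cl', 'ch', 'ph',
--     'gr', 'gl', 'gn', 'br', 'bl', 'dr', 'fl', 'fr', 'qu',
--     'b', 'c', 'd', 'f', 'g', 'h', 'k', 'l', 'm',
--     'n', 'p', 'q', 'r', 's', 't', 'v', 'x', 'z',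
-- ]
--
-- LAT_ENDINGS = [
--     'ibus', 'orum', 'arum', 'atur', 'itur', 'etur',
--     'ium', 'uum', 'rum', 'um', 'us', 'is', 'as', 'os', 'es', 'am', 'em',
--     'ae', 'ur', 'it', 'at', 'et', 'ut', 'ar', 'er', 'nt', 'ns',
--     'a', 'e', 'i', 'o', 'u',
-- ]
--
-- def decompose_latin(word):
--     initial = ''
--     ending = ''
--     rest = word
--     for ic in LAT_INITIALS:
--         if rest.startswith(ic) and len(rest) > len(ic):
--             initial = ic
--             rest = rest[len(ic):]
--             break
--     for ce in LAT_ENDINGS: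
--         if rest.endswith(ce) and len(rest) > len(ce):
--             ending = ce
--             rest = rest[:-len(ce)]
--             break
--     return initial, rest, ending
-- ===== SOURCE B (Python) =====
-- # B: trie (prefix-tree) longest-match instead of A's per-entry first-match scan.
-- # Correct because A's lists are ordered by descending length and a prefix of a
-- # given length determines the matched entry, so A's first match is the longest
-- # proper prefix/suffix in the set -- exactly what the trie walk computes.
--
-- _INITIALS = [
--     'str', 'spr', 'scr', 'squ',
--     'sp', 'st', 'sc', 'sq', 'sl', 'sm', 'sn',
--     'pr', 'pl', 'tr', 'th', 'cr', 'cl', 'ch', 'ph',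
--     'gr', 'gl', 'gn', 'br', 'bl', 'dr', 'fl', 'fr', 'qu',
--     'b', 'c', 'd', 'f', 'g', 'h', 'k', 'l', 'm',
--     'n', 'p', 'q', 'r', 's', 't', 'v', 'x', 'z',
-- ]
--
-- _ENDINGS = [
--     'ibus', 'orum', 'arum', 'atur', 'itur', 'etur',
--     'ium', 'uum', 'rum', 'um', 'us', 'is', 'as', 'os', 'es', 'am', 'em',
--     'ae', 'ur', 'it', 'at', 'et', 'ut', 'ar', 'er', 'nt', 'ns',
--     'a', 'e', 'i', 'o', 'u',
-- ]
--
-- def _trie(words, reverse=False):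
--     root = {}
--     for w in words:
--         node = root
--         for ch in (reversed(w) if reverse else w):
--             node = node.setdefault(ch, {})
--         node[None] = True  # accept marker
--     return root
--
-- _INIT_TRIE = _trie(_INITIALS)
-- _END_TRIE = _trie(_ENDINGS, reverse=True)
--
-- def _longest(root, chars):
--     # longest accepted proper prefix of chars along the trie path
--     node, best, depth = root, 0, 0
--     for ch in chars[:len(chars) - 1]:
--         if ch not in node:
--             break
--         node = node[ch]
--         depth += 1
--         if None in node:
--             best = depth
--     return best
--
-- def decompose_latin(word):
--     k = _longest(_INIT_TRIE, word)
--     initial, rest = word[:k], word[k:]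
--     e = _longest(_END_TRIE, rest[::-1])
--     n = len(rest) - e
--     return initial, rest[:n], rest[n:]
-- ===== Notes on version B (the rewrite author's own statement) =====
-- stated objective: alternative
-- what changed: Replaces A's per-entry first-match scans of the affix lists by prefix tries (built once, the ending trie over reversed endings) walked character by character to find the longest accepted proper prefix/suffix; correct because A's lists are ordered by descending length and a prefix of a given length determines the entry, so first match = longest match.
import Mathlib
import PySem

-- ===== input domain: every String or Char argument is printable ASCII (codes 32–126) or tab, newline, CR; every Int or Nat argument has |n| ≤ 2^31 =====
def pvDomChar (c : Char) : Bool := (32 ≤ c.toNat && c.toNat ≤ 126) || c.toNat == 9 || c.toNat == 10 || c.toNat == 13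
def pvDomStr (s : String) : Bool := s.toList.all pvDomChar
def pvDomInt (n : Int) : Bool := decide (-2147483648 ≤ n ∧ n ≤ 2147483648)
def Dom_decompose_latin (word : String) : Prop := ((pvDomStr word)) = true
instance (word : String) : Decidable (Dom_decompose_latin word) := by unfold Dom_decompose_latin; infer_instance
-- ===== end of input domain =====

-- B replaces A's per-entry first-match scans of the affix lists by prefix tries
-- (the ending trie over reversed endings) walked once per word for the longest
-- accepted proper prefix/suffix; same return value, alternative algorithm.

-- ===== PORT A =====
def pvLatInitials : List String :=
  ["str", "spr", "scr", "squ",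
   "sp", "st", "sc", "sq", "sl", "sm", "sn",
   "pr", "pl", "tr", "th", "cr", "cl", "ch", "ph",
   "gr", "gl", "gn", "br", "bl", "dr", "fl", "fr", "qu",
   "b", "c", "d", "f", "g", "h", "k", "l", "m",
   "n", "p", "q", "r", "s", "t", "v", "x", "z"]

def pvLatEndings : List String :=
  ["ibus", "orum", "arum", "atur", "itur", "etur",
   "ium", "uum", "rum", "um", "us", "is", "as", "os", "es", "am", "em",
   "ae", "ur", "it", "at", "et", "ut", "ar", "er", "nt", "ns",
   "a", "e", "i", "o", "u"]

-- first loop of A: scan the initials with break; rest[len(ic):] is PySem.List.slice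
def pvScanInit : List String → List Char → String × List Char
  | [], rest => ("", rest)
  | ic :: t, rest =>
    if PySem.Chars.startswith rest ic.toList ∧ ic.toList.length < rest.length then
      (ic, PySem.List.slice rest (some (ic.toList.length : Int)) none)
    else pvScanInit t rest

-- second loop of A: scan the endings with break; rest[:-len(ce)] is PySem.List.slice
def pvScanEnd : List String → List Char → String × List Char
  | [], rest => ("", rest)
  | ce :: t, rest =>
    if PySem.Chars.endswith rest ce.toList ∧ ce.toList.length < rest.length then
      (ce, PySem.List.slice rest none (some (-(ce.toList.length : Int))))
    else pvScanEnd t rest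

def decompose_latin (word : String) : String × String × String :=
  let i := pvScanInit pvLatInitials word.toList
  let e := pvScanEnd pvLatEndings i.2
  (i.1, String.ofList e.2, e.1)

-- ===== PORT B =====
-- Source B's affix data (B's own copies of the two lists)
def pvInitialsB : List String :=
  ["str", "spr", "scr", "squ",
   "sp", "st", "sc", "sq", "sl", "sm", "sn",
   "pr", "pl", "tr", "th", "cr", "cl", "ch", "ph",
   "gr", "gl", "gn", "br", "bl", "dr", "fl", "fr", "qu",
   "b", "c", "d", "f", "g", "h", "k", "l", "m",
   "n", "p", "q", "r", "s", "t", "v", "x", "z"]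

def pvEndingsB : List String :=
  ["ibus", "orum", "arum", "atur", "itur", "etur",
   "ium", "uum", "rum", "um", "us", "is", "as", "os", "es", "am", "em",
   "ae", "ur", "it", "at", "et", "ut", "ar", "er", "nt", "ns",
   "a", "e", "i", "o", "u"]

-- Source B's dict-of-dicts trie, encoded left-child/right-sibling (PySem.Dict cannot
-- hold recursive values); `acc` is the node's `None in node` accept marker.
inductive PvTrie : Type
  | nil : PvTrie
  | node : Char → Bool → PvTrie → PvTrie → PvTrie   -- char, accept, child, sibling
deriving DecidableEq, Repr

-- _trie's insert walk (node.setdefault per char, accept mark after the last char)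
def PvTrie.ins : PvTrie → List Char → PvTrie
  | t, [] => t
  | .nil, c :: cs => .node c cs.isEmpty (PvTrie.ins .nil cs) .nil
  | .node d a ch sib, c :: cs =>
    if d = c then .node d (a || cs.isEmpty) (PvTrie.ins ch cs) sib
    else .node d a ch (PvTrie.ins sib (c :: cs))
termination_by t l => (l.length, sizeOf t)

-- `ch in node` / `node[ch]` on the sibling chain
def pvFind : PvTrie → Char → Option (Bool × PvTrie)
  | .nil, _ => none
  | .node d a ch sib, c => if d = c then some (a, ch) else pvFind sib c

def pvBuild (entries : List (List Char)) : PvTrie := entries.foldl PvTrie.ins .nil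

def pvInitChain : PvTrie := pvBuild (pvInitialsB.map String.toList)
def pvEndChain : PvTrie := pvBuild (pvEndingsB.map (fun s => s.toList.reverse))

-- _longest: walk chars[:len-1] through the trie, remember the deepest accept
def pvWalk : PvTrie → List Char → Nat → Nat → Nat
  | _, [], _, best => best
  | chain, c :: cs, depth, best =>
    match pvFind chain c with
    | none => best
    | some (a, child) => pvWalk child cs (depth + 1) (if a then depth + 1 else best)

def decompose_latin_alt (word : String) : String × String × String :=
  let l := word.toList
  let k := pvWalk pvInitChain (l.take (l.length - 1)) 0 0
  let rest := l.drop k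
  let e := pvWalk pvEndChain (rest.reverse.take (rest.length - 1)) 0 0
  let n := rest.length - e
  (String.ofList (l.take k), String.ofList (rest.take n), String.ofList (rest.drop n))

-- ===== PRECONDITION & SPEC =====
def Spec_decompose_latin (word : String) (out : String × String × String) : Prop := out = decompose_latin_alt word
instance (word : String) (out : String × String × String) : Decidable (Spec_decompose_latin word out) := by unfold Spec_decompose_latin; infer_instance

-- ===== CLAIM (what is proved, stated in full; the proofs are below) =====
def Claim_equal_decompose_latin : Prop := ∀ (word : String), Dom_decompose_latin word → Spec_decompose_latin word (decompose_latin word)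

-- ===== LEMMAS AND PROOFS =====

theorem pvOfList_eq_iff (l : List Char) (s : String) : String.ofList l = s ↔ l = s.toList := by
  constructor
  · intro h; rw [← h, String.toList_ofList]
  · intro h; rw [h, String.ofList_toList]

theorem pvOfList_mem_iff (x : List Char) (g : List String) :
    (String.ofList x ∈ g) ↔ x ∈ g.map String.toList := by
  rw [List.mem_map]
  constructor
  · intro h; exact ⟨String.ofList x, h, String.toList_ofList (l := x)⟩
  · rintro ⟨s, hs, he⟩
    have : String.ofList x = s := by rw [← he, String.ofList_toList]
    exact this ▸ hs

-- membership (as a char list) in the trie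
def pvMem : PvTrie → List Char → Bool
  | _, [] => false
  | chain, c :: cs =>
    match pvFind chain c with
    | none => false
    | some (a, child) => if cs.isEmpty then a else pvMem child cs

-- longest k with pvMem chain (cs.take k), as an Option
def pvLongest : PvTrie → List Char → Option Nat
  | _, [] => none
  | chain, c :: cs =>
    match pvFind chain c with
    | none => none
    | some (a, child) =>
      match pvLongest child cs with
      | some k => some (k + 1)
      | none => if a then some 1 else none

theorem pvWalk_eq_longest (cs : List Char) : ∀ (chain : PvTrie) (depth best : Nat),
    pvWalk chain cs depth best =
      match pvLongest chain cs with
      | some k => depth + k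
      | none => best := by
  induction cs with
  | nil => intro chain depth best; simp [pvWalk, pvLongest]
  | cons c cs ih =>
    intro chain depth best
    simp only [pvWalk, pvLongest]
    cases hf : pvFind chain c with
    | none => rfl
    | some p =>
      obtain ⟨a, child⟩ := p
      dsimp only
      rw [ih child]
      cases hl : pvLongest child cs with
      | some k => simp [Nat.add_assoc, Nat.add_comm 1 k]
      | none => cases a <;> simp

theorem pvLongest_mem (cs : List Char) : ∀ (chain : PvTrie) (k : Nat),
    pvLongest chain cs = some k →
    1 ≤ k ∧ k ≤ cs.length ∧ pvMem chain (cs.take k) = true := by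
  induction cs with
  | nil => intro chain k h; simp [pvLongest] at h
  | cons c cs ih =>
    intro chain k h
    simp only [pvLongest] at h
    cases hf : pvFind chain c with
    | none => rw [hf] at h; exact absurd h (by simp)
    | some p =>
      obtain ⟨a, child⟩ := p
      rw [hf] at h; dsimp only at h
      cases hl : pvLongest child cs with
      | some k' =>
        rw [hl] at h; dsimp only at h
        obtain ⟨h1, h2, h3⟩ := ih child k' hl
        have hk : k = k' + 1 := (Option.some.inj h).symm
        subst hk
        refine ⟨by omega, by simp only [List.length_cons]; omega, ?_⟩
        have htk : (c :: cs).take (k' + 1) = c :: cs.take k' := by simp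
        rw [htk]
        have hne : (cs.take k').isEmpty = false := by
          rw [List.isEmpty_eq_false_iff]
          intro hemp
          rcases List.take_eq_nil_iff.mp hemp with h | h
          · omega
          · subst h; simp at h2; omega
        simp only [pvMem, hf, hne]
        exact h3
      | none =>
        rw [hl] at h; dsimp only at h
        cases ha : a with
        | false => rw [ha] at h; exact absurd h (by simp)
        | true =>
          rw [ha] at h; simp at h
          subst h
          refine ⟨le_refl 1, by simp, ?_⟩
          simp [pvMem, hf, ha]

theorem pvMem_le_longest (cs : List Char) : ∀ (chain : PvTrie) (j : Nat),
    pvMem chain (cs.take j) = true → 1 ≤ j → j ≤ cs.length →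
    ∃ k, pvLongest chain cs = some k ∧ j ≤ k := by
  induction cs with
  | nil => intro chain j _ h1 h2; simp at h2; omega
  | cons c cs ih =>
    intro chain j hm h1 h2
    obtain ⟨j', rfl⟩ : ∃ j', j = j' + 1 := ⟨j - 1, by omega⟩
    rw [List.take_succ_cons] at hm
    cases hf : pvFind chain c with
    | none => simp [pvMem, hf] at hm
    | some p =>
      obtain ⟨a, child⟩ := p
      simp only [pvMem, hf] at hm
      by_cases hj0 : j' = 0
      · subst hj0
        simp at hm
        cases hl : pvLongest child cs with
        | some k' => exact ⟨k' + 1, by simp [pvLongest, hf, hl], by omega⟩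
        | none => exact ⟨1, by simp [pvLongest, hf, hl, hm], le_refl 1⟩
      · have hne : (cs.take j').isEmpty = false := by
          rw [List.isEmpty_eq_false_iff]
          intro hemp
          rcases List.take_eq_nil_iff.mp hemp with h | h
          · omega
          · subst h; simp at h2; omega
        rw [hne] at hm
        simp at hm
        obtain ⟨k', hk', hjk⟩ := ih child j' hm (by omega) (by simp only [List.length_cons] at h2; omega)
        exact ⟨k' + 1, by simp [pvLongest, hf, hk'], by omega⟩

theorem pvMem_nil (l : List Char) : pvMem .nil l = false := by
  cases l <;> simp [pvMem, pvFind]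

theorem pvFind_ins (t : PvTrie) (b : Char) (bs : List Char) (c : Char) :
    pvFind (PvTrie.ins t (b :: bs)) c =
      if b = c then
        match pvFind t b with
        | none => some (bs.isEmpty, PvTrie.ins .nil bs)
        | some (a, ch) => some (a || bs.isEmpty, PvTrie.ins ch bs)
      else pvFind t c := by
  induction t with
  | nil =>
    by_cases hbc : b = c <;> simp [PvTrie.ins, pvFind, hbc]
  | node d a ch sib ihc ihs =>
    by_cases hdb : d = b
    · subst hdb
      by_cases hdc : d = c
      · subst hdc; simp [PvTrie.ins, pvFind]
      · simp [PvTrie.ins, pvFind, hdc]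
    · by_cases hbc : b = c
      · subst hbc
        simp [PvTrie.ins, pvFind, hdb, ihs]
      · by_cases hdc : d = c
        · subst hdc; simp [PvTrie.ins, pvFind, hdb, hbc]
        · simp [PvTrie.ins, pvFind, hdb, hbc, hdc, ihs]

theorem pvMem_ins (e : List Char) (t : PvTrie) (l : List Char) (he : e ≠ []) :
    pvMem (PvTrie.ins t e) l = (decide (l = e) || pvMem t l) := by
  induction e generalizing t l with
  | nil => exact absurd rfl he
  | cons b bs ih =>
    cases l with
    | nil => simp [pvMem]
    | cons c ds =>
      simp only [pvMem, pvFind_ins]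
      by_cases hbc : b = c
      · subst hbc
        rw [if_pos rfl]
        have hne : decide (b :: ds = b :: bs) = decide (ds = bs) := by simp
        cases hft : pvFind t b with
        | none =>
          dsimp only
          cases hds : ds with
          | nil => cases bs <;> simp
          | cons y ys =>
            rw [← hds]
            have hdse : ds.isEmpty = false := by simp [hds]
            rw [hdse]
            simp only [Bool.false_eq_true, if_false]
            cases hbs : bs with
            | nil =>
              simp only [PvTrie.ins, pvMem_nil]
              simp [hds]
            | cons z zs =>
              rw [← hbs]
              rw [ih _ _ (by simp [hbs]), pvMem_nil, hne]
        | some p =>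
          obtain ⟨a, ch⟩ := p
          dsimp only
          cases hds : ds with
          | nil => cases bs <;> simp [Bool.or_comm]
          | cons y ys =>
            rw [← hds]
            have hdse : ds.isEmpty = false := by simp [hds]
            rw [hdse]
            simp only [Bool.false_eq_true, if_false]
            cases hbs : bs with
            | nil =>
              simp only [PvTrie.ins]
              simp [hds]
            | cons z zs =>
              rw [← hbs, ih _ _ (by simp [hbs]), hne]
      · rw [if_neg hbc]
        have : decide (c :: ds = b :: bs) = false := by
          simp; intro h; exact absurd h.symm hbc
        rw [this, Bool.false_or]

theorem pvMem_build (entries : List (List Char)) (hne : ∀ e ∈ entries, e ≠ []) :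
    ∀ (t : PvTrie) (l : List Char),
    pvMem (entries.foldl PvTrie.ins t) l = (pvMem t l || decide (l ∈ entries)) := by
  induction entries with
  | nil => intro t l; simp
  | cons e es ih =>
    intro t l
    rw [List.foldl_cons, ih (fun x hx => hne x (by simp [hx])), pvMem_ins e t l (hne e (by simp))]
    by_cases h : l = e <;> simp [h, Bool.or_comm]


-- canonical middle form: the affix length A and B both select
def pvInitsL : List (List Char) := pvInitialsB.map String.toList
def pvEndsL : List (List Char) := pvEndingsB.map String.toList

def pvInitLen (l : List Char) : Nat :=
  if 3 < l.length ∧ l.take 3 ∈ pvInitsL then 3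
  else if 2 < l.length ∧ l.take 2 ∈ pvInitsL then 2
  else if 1 < l.length ∧ l.take 1 ∈ pvInitsL then 1
  else 0

def pvEndLen (r : List Char) : Nat :=
  if 4 < r.length ∧ r.drop (r.length - 4) ∈ pvEndsL then 4
  else if 3 < r.length ∧ r.drop (r.length - 3) ∈ pvEndsL then 3
  else if 2 < r.length ∧ r.drop (r.length - 2) ∈ pvEndsL then 2
  else if 1 < r.length ∧ r.drop (r.length - 1) ∈ pvEndsL then 1
  else 0

-- A's scan of a block of same-length initials followed by the remaining entries
theorem pvScanInit_group (L : Nat) (g tail : List String)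
    (hg : ∀ s ∈ g, s.toList.length = L) (r : List Char) :
    pvScanInit (g ++ tail) r =
      if L < r.length ∧ String.ofList (r.take L) ∈ g then
        (String.ofList (r.take L), r.drop L)
      else pvScanInit tail r := by
  induction g with
  | nil => simp
  | cons ic t ih =>
    have hic : ic.toList.length = L := hg ic (by simp)
    have hsw : (PySem.Chars.startswith r ic.toList = true) ↔ ic.toList = r.take L := by
      rw [PySem.Chars.startswith_iff, List.prefix_iff_eq_take, hic]
    have hmem : (String.ofList (r.take L) = ic) ↔ ic.toList = r.take L := by
      rw [pvOfList_eq_iff]; constructor <;> (intro h; exact h.symm)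
    by_cases heq : ic.toList = r.take L
    · by_cases hlen : L < r.length
      · have hst : PySem.Chars.startswith r ic.toList = true := hsw.mpr heq
        have hofl : String.ofList (r.take L) = ic := hmem.mpr heq
        rw [List.cons_append]
        simp only [pvScanInit]
        rw [if_pos ⟨hst, by rw [hic]; exact hlen⟩,
          if_pos ⟨hlen, List.mem_cons.mpr (Or.inl hofl)⟩, hic,
          PySem.List.slice_from_natCast, hofl]
      · have h1 : ¬ (PySem.Chars.startswith r ic.toList = true ∧ ic.toList.length < r.length) := by
          rw [hic]; exact fun h => hlen h.2
        simp only [List.cons_append, pvScanInit, if_neg h1, ih (fun s hs => hg s (by simp [hs]))]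
        rw [if_neg (fun h => hlen h.1), if_neg (fun h => hlen h.1)]
    · have h1 : ¬ (PySem.Chars.startswith r ic.toList = true ∧ ic.toList.length < r.length) := by
        intro h; exact heq (hsw.mp h.1)
      simp only [List.cons_append, pvScanInit, if_neg h1, ih (fun s hs => hg s (by simp [hs]))]
      have hm2 : (String.ofList (r.take L) ∈ ic :: t) ↔ (String.ofList (r.take L) ∈ t) := by
        simp only [List.mem_cons]
        constructor
        · rintro (h | h)
          · exact absurd (hmem.mp h) heq
          · exact h
        · exact Or.inr
      exact if_congr (and_congr_right fun _ => hm2.symm) rfl rfl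

-- A's scan of a block of same-length endings followed by the remaining entries
theorem pvScanEnd_group (L : Nat) (hL : 0 < L) (g tail : List String)
    (hg : ∀ s ∈ g, s.toList.length = L) (r : List Char) :
    pvScanEnd (g ++ tail) r =
      if L < r.length ∧ String.ofList (r.drop (r.length - L)) ∈ g then
        (String.ofList (r.drop (r.length - L)), r.take (r.length - L))
      else pvScanEnd tail r := by
  induction g with
  | nil => simp
  | cons ce t ih =>
    have hce : ce.toList.length = L := hg ce (by simp)
    have hsw : (PySem.Chars.endswith r ce.toList = true) ↔ ce.toList = r.drop (r.length - L) := by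
      rw [PySem.Chars.endswith_iff, List.suffix_iff_eq_drop, hce]
    have hmem : (String.ofList (r.drop (r.length - L)) = ce) ↔ ce.toList = r.drop (r.length - L) := by
      rw [pvOfList_eq_iff]; constructor <;> (intro h; exact h.symm)
    by_cases heq : ce.toList = r.drop (r.length - L)
    · by_cases hlen : L < r.length
      · have hst : PySem.Chars.endswith r ce.toList = true := hsw.mpr heq
        have hofl : String.ofList (r.drop (r.length - L)) = ce := hmem.mpr heq
        rw [List.cons_append]
        simp only [pvScanEnd]
        rw [if_pos ⟨hst, by rw [hce]; exact hlen⟩,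
          if_pos ⟨hlen, List.mem_cons.mpr (Or.inl hofl)⟩, hce,
          PySem.List.slice_to_neg_natCast r L hL, hofl]
      · have h1 : ¬ (PySem.Chars.endswith r ce.toList = true ∧ ce.toList.length < r.length) := by
          rw [hce]; exact fun h => hlen h.2
        simp only [List.cons_append, pvScanEnd, if_neg h1, ih (fun s hs => hg s (by simp [hs]))]
        rw [if_neg (fun h => hlen h.1), if_neg (fun h => hlen h.1)]
    · have h1 : ¬ (PySem.Chars.endswith r ce.toList = true ∧ ce.toList.length < r.length) := by
        intro h; exact heq (hsw.mp h.1)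
      simp only [List.cons_append, pvScanEnd, if_neg h1, ih (fun s hs => hg s (by simp [hs]))]
      have hm2 : (String.ofList (r.drop (r.length - L)) ∈ ce :: t) ↔
          (String.ofList (r.drop (r.length - L)) ∈ t) := by
        simp only [List.mem_cons]
        constructor
        · rintro (h | h)
          · exact absurd (hmem.mp h) heq
          · exact h
        · exact Or.inr
      exact if_congr (and_congr_right fun _ => hm2.symm) rfl rfl

-- group membership = whole-list membership once the length is pinned by the slice
theorem pvGroup_iff (L : Nat) (g : List String) (full : List (List Char))
    (hg : g.map String.toList = full.filter (fun e => decide (e.length = L)))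
    (x : List Char) (hx : x.length = L) :
    (String.ofList x ∈ g) ↔ x ∈ full := by
  rw [pvOfList_mem_iff, hg, List.mem_filter]
  simp [hx]

-- A's initial scan computes pvInitLen
theorem pvScanInit_eq (l : List Char) :
    pvScanInit pvLatInitials l =
      (String.ofList (l.take (pvInitLen l)), l.drop (pvInitLen l)) := by
  have hsplit : pvLatInitials =
      pvLatInitials.take 4 ++ ((pvLatInitials.drop 4).take 24 ++ ((pvLatInitials.drop 28).take 18 ++ [])) := by
    rfl
  rw [hsplit,
    pvScanInit_group 3 _ _ (by decide) l,
    pvScanInit_group 2 _ _ (by decide) l,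
    pvScanInit_group 1 _ _ (by decide) l]
  have h3 : ∀ (h : 3 < l.length), (String.ofList (l.take 3) ∈ pvLatInitials.take 4) ↔ l.take 3 ∈ pvInitsL :=
    fun h => pvGroup_iff 3 _ pvInitsL (by decide) _ (by simp; omega)
  have h2 : ∀ (h : 2 < l.length), (String.ofList (l.take 2) ∈ (pvLatInitials.drop 4).take 24) ↔ l.take 2 ∈ pvInitsL :=
    fun h => pvGroup_iff 2 _ pvInitsL (by decide) _ (by simp; omega)
  have h1 : ∀ (h : 1 < l.length), (String.ofList (l.take 1) ∈ (pvLatInitials.drop 28).take 18) ↔ l.take 1 ∈ pvInitsL :=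
    fun h => pvGroup_iff 1 _ pvInitsL (by decide) _ (by simp; omega)
  unfold pvInitLen
  by_cases c3 : 3 < l.length ∧ l.take 3 ∈ pvInitsL
  · rw [if_pos ⟨c3.1, (h3 c3.1).mpr c3.2⟩, if_pos c3]
  · rw [if_neg (fun h => c3 ⟨h.1, (h3 h.1).mp h.2⟩), if_neg c3]
    by_cases c2 : 2 < l.length ∧ l.take 2 ∈ pvInitsL
    · rw [if_pos ⟨c2.1, (h2 c2.1).mpr c2.2⟩, if_pos c2]
    · rw [if_neg (fun h => c2 ⟨h.1, (h2 h.1).mp h.2⟩), if_neg c2]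
      by_cases c1 : 1 < l.length ∧ l.take 1 ∈ pvInitsL
      · rw [if_pos ⟨c1.1, (h1 c1.1).mpr c1.2⟩, if_pos c1]
      · rw [if_neg (fun h => c1 ⟨h.1, (h1 h.1).mp h.2⟩), if_neg c1]
        simp [pvScanInit]

-- A's ending scan computes pvEndLen
theorem pvScanEnd_eq (r : List Char) :
    pvScanEnd pvLatEndings r =
      (String.ofList (r.drop (r.length - pvEndLen r)), r.take (r.length - pvEndLen r)) := by
  have hsplit : pvLatEndings =
      pvLatEndings.take 6 ++ ((pvLatEndings.drop 6).take 3 ++ ((pvLatEndings.drop 9).take 18 ++ ((pvLatEndings.drop 27).take 5 ++ []))) := by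
    rfl
  rw [hsplit,
    pvScanEnd_group 4 (by omega) _ _ (by decide) r,
    pvScanEnd_group 3 (by omega) _ _ (by decide) r,
    pvScanEnd_group 2 (by omega) _ _ (by decide) r,
    pvScanEnd_group 1 (by omega) _ _ (by decide) r]
  have h4 : ∀ (h : 4 < r.length), (String.ofList (r.drop (r.length - 4)) ∈ pvLatEndings.take 6) ↔ r.drop (r.length - 4) ∈ pvEndsL :=
    fun h => pvGroup_iff 4 _ pvEndsL (by decide) _ (by simp; omega)
  have h3 : ∀ (h : 3 < r.length), (String.ofList (r.drop (r.length - 3)) ∈ (pvLatEndings.drop 6).take 3) ↔ r.drop (r.length - 3) ∈ pvEndsL :=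
    fun h => pvGroup_iff 3 _ pvEndsL (by decide) _ (by simp; omega)
  have h2 : ∀ (h : 2 < r.length), (String.ofList (r.drop (r.length - 2)) ∈ (pvLatEndings.drop 9).take 18) ↔ r.drop (r.length - 2) ∈ pvEndsL :=
    fun h => pvGroup_iff 2 _ pvEndsL (by decide) _ (by simp; omega)
  have h1 : ∀ (h : 1 < r.length), (String.ofList (r.drop (r.length - 1)) ∈ (pvLatEndings.drop 27).take 5) ↔ r.drop (r.length - 1) ∈ pvEndsL :=
    fun h => pvGroup_iff 1 _ pvEndsL (by decide) _ (by simp; omega)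
  unfold pvEndLen
  by_cases c4 : 4 < r.length ∧ r.drop (r.length - 4) ∈ pvEndsL
  · rw [if_pos ⟨c4.1, (h4 c4.1).mpr c4.2⟩, if_pos c4]
  · rw [if_neg (fun h => c4 ⟨h.1, (h4 h.1).mp h.2⟩), if_neg c4]
    by_cases c3 : 3 < r.length ∧ r.drop (r.length - 3) ∈ pvEndsL
    · rw [if_pos ⟨c3.1, (h3 c3.1).mpr c3.2⟩, if_pos c3]
    · rw [if_neg (fun h => c3 ⟨h.1, (h3 h.1).mp h.2⟩), if_neg c3]
      by_cases c2 : 2 < r.length ∧ r.drop (r.length - 2) ∈ pvEndsL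
      · rw [if_pos ⟨c2.1, (h2 c2.1).mpr c2.2⟩, if_pos c2]
      · rw [if_neg (fun h => c2 ⟨h.1, (h2 h.1).mp h.2⟩), if_neg c2]
        by_cases c1 : 1 < r.length ∧ r.drop (r.length - 1) ∈ pvEndsL
        · rw [if_pos ⟨c1.1, (h1 c1.1).mpr c1.2⟩, if_pos c1]
        · rw [if_neg (fun h => c1 ⟨h.1, (h1 h.1).mp h.2⟩), if_neg c1]
          simp [pvScanEnd]

-- B's trie walk selects the greatest matching length ≤ 4 (as descending ifs)
theorem pvWalk_desc (chain : PvTrie) (v : List Char) (P : Nat → Prop) [DecidablePred P]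
    (hmem : ∀ j, 1 ≤ j → (P j ↔ (j ≤ v.length ∧ pvMem chain (v.take j) = true)))
    (hb : ∀ j, 1 ≤ j → j ≤ v.length → pvMem chain (v.take j) = true → j ≤ 4) :
    pvWalk chain v 0 0 =
      if P 4 then 4 else if P 3 then 3 else if P 2 then 2 else if P 1 then 1 else 0 := by
  rw [pvWalk_eq_longest]
  cases hl : pvLongest chain v with
  | none =>
    have hno : ∀ j, 1 ≤ j → ¬ P j := by
      intro j h1 hp
      obtain ⟨hle, hm⟩ := (hmem j h1).mp hp
      obtain ⟨k, hk, _⟩ := pvMem_le_longest v chain j hm h1 hle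
      rw [hl] at hk; cases hk
    rw [if_neg (hno 4 (by omega)), if_neg (hno 3 (by omega)),
      if_neg (hno 2 (by omega)), if_neg (hno 1 (by omega))]
  | some k =>
    obtain ⟨hk1, hk2, hk3⟩ := pvLongest_mem v chain k hl
    have hk4 : k ≤ 4 := hb k hk1 hk2 hk3
    have hPk : P k := (hmem k hk1).mpr ⟨hk2, hk3⟩
    have hmax : ∀ j, k < j → ¬ P j := by
      intro j hj hp
      obtain ⟨hle, hm⟩ := (hmem j (by omega)).mp hp
      obtain ⟨k2, hk', hjk'⟩ := pvMem_le_longest v chain j hm (by omega) hle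
      rw [hl] at hk'
      have := Option.some.inj hk'
      omega
    interval_cases k
    · rw [if_neg (hmax 4 (by omega)), if_neg (hmax 3 (by omega)),
        if_neg (hmax 2 (by omega)), if_pos hPk]
    · rw [if_neg (hmax 4 (by omega)), if_neg (hmax 3 (by omega)), if_pos hPk]
    · rw [if_neg (hmax 4 (by omega)), if_pos hPk]
    · rw [if_pos hPk]

theorem pvMem_initChain (x : List Char) : pvMem pvInitChain x = decide (x ∈ pvInitsL) := by
  rw [pvInitChain, pvBuild, pvMem_build _ (by decide) PvTrie.nil x, pvMem_nil, Bool.false_or]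
  rfl

theorem pvMem_endChain (x : List Char) : pvMem pvEndChain x = decide (x.reverse ∈ pvEndsL) := by
  rw [pvEndChain, pvBuild, pvMem_build _ (by decide) PvTrie.nil x, pvMem_nil, Bool.false_or]
  have : (x ∈ pvEndingsB.map (fun s => s.toList.reverse)) ↔ x.reverse ∈ pvEndsL := by
    unfold pvEndsL
    rw [List.mem_map, List.mem_map]
    constructor
    · rintro ⟨s, hs, he⟩; exact ⟨s, hs, by rw [← he, List.reverse_reverse]⟩
    · rintro ⟨s, hs, he⟩; exact ⟨s, hs, by rw [he, List.reverse_reverse]⟩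
  simp [this]

theorem pvInits_short : ∀ x ∈ pvInitsL, x.length ≤ 3 := by decide
theorem pvEnds_short : ∀ x ∈ pvEndsL, x.length ≤ 4 := by decide

theorem pvWalkInit (l : List Char) :
    pvWalk pvInitChain (l.take (l.length - 1)) 0 0 = pvInitLen l := by
  have hvlen : (l.take (l.length - 1)).length = l.length - 1 := by simp
  have htake : ∀ j, j ≤ l.length - 1 → (l.take (l.length - 1)).take j = l.take j := by
    intro j hj; rw [List.take_take]; congr 1; omega
  have hmem : ∀ j, 1 ≤ j →
      ((j < l.length ∧ l.take j ∈ pvInitsL) ↔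
        (j ≤ (l.take (l.length - 1)).length ∧ pvMem pvInitChain ((l.take (l.length - 1)).take j) = true)) := by
    intro j h1
    constructor
    · rintro ⟨ha, hbm⟩
      refine ⟨by omega, ?_⟩
      rw [htake j (by omega), pvMem_initChain]
      exact decide_eq_true hbm
    · rintro ⟨ha, hbm⟩
      rw [hvlen] at ha
      rw [htake j (by omega), pvMem_initChain] at hbm
      exact ⟨by omega, of_decide_eq_true hbm⟩
  have hb : ∀ j, 1 ≤ j → j ≤ (l.take (l.length - 1)).length →
      pvMem pvInitChain ((l.take (l.length - 1)).take j) = true → j ≤ 4 := by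
    intro j h1 h2 hm
    rw [hvlen] at h2
    rw [htake j (by omega), pvMem_initChain] at hm
    have := pvInits_short _ (of_decide_eq_true hm)
    rw [List.length_take] at this
    omega
  rw [pvWalk_desc pvInitChain _ (fun j => j < l.length ∧ l.take j ∈ pvInitsL) hmem hb]
  have h4 : ¬ (4 < l.length ∧ l.take 4 ∈ pvInitsL) := by
    rintro ⟨ha, hbm⟩
    have := pvInits_short _ hbm
    rw [List.length_take] at this
    omega
  rw [if_neg h4]
  rfl

theorem pvRevTake (r : List Char) (j : Nat) :
    r.reverse.take j = (r.drop (r.length - j)).reverse := by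
  by_cases hj : j ≤ r.length
  · rw [List.reverse_drop]
    congr 1
    omega
  · have h0 : r.length - j = 0 := by omega
    rw [List.take_of_length_le (by simp; omega), h0, List.drop_zero]

theorem pvWalkEnd (r : List Char) :
    pvWalk pvEndChain (r.reverse.take (r.length - 1)) 0 0 = pvEndLen r := by
  have hvlen : (r.reverse.take (r.length - 1)).length = r.length - 1 := by simp
  have htake : ∀ j, j ≤ r.length - 1 →
      (r.reverse.take (r.length - 1)).take j = (r.drop (r.length - j)).reverse := by
    intro j hj
    rw [List.take_take]
    have : min j (r.length - 1) = j := by omega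
    rw [this, pvRevTake]
  have hmem : ∀ j, 1 ≤ j →
      ((j < r.length ∧ r.drop (r.length - j) ∈ pvEndsL) ↔
        (j ≤ (r.reverse.take (r.length - 1)).length ∧ pvMem pvEndChain ((r.reverse.take (r.length - 1)).take j) = true)) := by
    intro j h1
    constructor
    · rintro ⟨ha, hbm⟩
      refine ⟨by omega, ?_⟩
      rw [htake j (by omega), pvMem_endChain, List.reverse_reverse]
      exact decide_eq_true hbm
    · rintro ⟨ha, hbm⟩
      rw [hvlen] at ha
      rw [htake j (by omega), pvMem_endChain, List.reverse_reverse] at hbm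
      exact ⟨by omega, of_decide_eq_true hbm⟩
  have hb : ∀ j, 1 ≤ j → j ≤ (r.reverse.take (r.length - 1)).length →
      pvMem pvEndChain ((r.reverse.take (r.length - 1)).take j) = true → j ≤ 4 := by
    intro j h1 h2 hm
    rw [hvlen] at h2
    rw [htake j (by omega), pvMem_endChain, List.reverse_reverse] at hm
    have := pvEnds_short _ (of_decide_eq_true hm)
    rw [List.length_drop] at this
    omega
  rw [pvWalk_desc pvEndChain _ (fun j => j < r.length ∧ r.drop (r.length - j) ∈ pvEndsL) hmem hb]
  rfl

-- ===== VERDICT (by name: the statement is the Claim_ definition above) =====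
theorem decompose_latin_spec : Claim_equal_decompose_latin := by
  intro word _
  unfold Spec_decompose_latin decompose_latin decompose_latin_alt
  simp only [pvScanInit_eq, pvScanEnd_eq, pvWalkInit, pvWalkEnd]
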